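-- pv_equiv track=rewrite | github.com/HackerTheCreator/QR_Code_Generator | qr_code_generator.py | Blocks_Interleaving
-- ===== SOURCE A (Python) =====
-- def Blocks_Interleaving(splited_data:list[list[list[int], list[int]]]) -> tuple[list[int], list[int]]:
--     def Loop(using_list:list[int], using_index:int):
--         new_interleaved_codewords = []
--
--         all_codewords = [x[using_index] for x in using_list]
--         for i in range(len(using_list[-1][using_index])):
--             for codeword in all_codewords:
--                 if i < len(codeword):
--                     new_interleaved_codewords.append(codeword[i])
--         return new_interleaved_codewords
--
--     return Loop(splited_data, 0), Loop(splited_data, 1)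
-- ===== SOURCE B (Python) =====
-- def Blocks_Interleaving(splited_data: list[list[list[int], list[int]]]) -> tuple[list[int], list[int]]:
--     def peel(cols):
--         # round-robin: take the head of every nonempty block, recurse on tails;
--         # stop when the LAST block is exhausted (that is the column count A uses)
--         if not cols[-1]:
--             return []
--         return [c[0] for c in cols if c] + peel([c[1:] for c in cols])
--     def run(idx):
--         return peel([block[idx] for block in splited_data])
--     return run(0), run(1)
-- ===== Notes on version B (the rewrite author's own statement) =====
-- stated objective: alternative
-- what changed: B replaces A's index-driven double loop (for each column index, rescan every block) with a recursive round-robin peel: take the head of every nonempty block, recurse on the tails, and stop when the last block is exhausted.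
import Mathlib
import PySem

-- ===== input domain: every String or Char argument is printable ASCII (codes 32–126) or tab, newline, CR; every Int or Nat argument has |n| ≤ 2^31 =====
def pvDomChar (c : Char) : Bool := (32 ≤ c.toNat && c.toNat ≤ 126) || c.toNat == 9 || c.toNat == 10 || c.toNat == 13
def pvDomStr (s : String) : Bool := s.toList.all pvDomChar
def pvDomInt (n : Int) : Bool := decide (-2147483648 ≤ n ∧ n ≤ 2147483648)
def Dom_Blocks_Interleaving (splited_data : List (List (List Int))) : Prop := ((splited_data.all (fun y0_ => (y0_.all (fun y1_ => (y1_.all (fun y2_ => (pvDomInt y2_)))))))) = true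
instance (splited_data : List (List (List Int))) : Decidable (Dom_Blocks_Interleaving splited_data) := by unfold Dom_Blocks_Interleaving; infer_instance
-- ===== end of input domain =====

-- B replaces A's index-driven double loop with a recursive round-robin peel (heads of all
-- nonempty blocks, then recurse on the tails, stopping when the last block is exhausted):
-- an alternative decomposition of the same interleaving, same cost.

-- ===== PORT A =====
-- inner 'Loop' of A; codeword[i] is ported as cw.getD i 0, exact because it is guarded by i < len(cw)
def pvLoopA (ul : List (List (List Int))) (idx : Int) : List Int :=
  let all := ul.map (fun x => (PySem.List.pyGet? x idx).getD [])
  let n := ((PySem.List.pyGet? ((PySem.List.pyGet? ul (-1)).getD []) idx).getD []).length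
  (List.range n).foldl (fun acc i =>
    all.foldl (fun acc cw => if i < cw.length then acc ++ [cw.getD i 0] else acc) acc) []

def Blocks_Interleaving (splited_data : List (List (List Int))) : List Int × List Int :=
  (pvLoopA splited_data 0, pvLoopA splited_data 1)

-- ===== PORT B =====
-- termination measure helper for pvPeel (cited by name in decreasing_by)
theorem pv_tail_sum_lt (cols : List (List Int)) (l : List Int)
    (hl : cols.getLast? = some l) (hlne : l ≠ []) :
    (cols.map (fun c => c.tail.length)).sum < (cols.map List.length).sum := by
  induction cols with
  | nil => simp at hl
  | cons c cs ih =>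
    simp only [List.map_cons, List.sum_cons]
    rcases cs with _ | ⟨d, ds⟩
    · simp at hl; subst hl
      cases c with
      | nil => exact absurd rfl hlne
      | cons a t => simp
    · rw [List.getLast?_cons_cons] at hl
      have h1 := ih hl
      simp only [List.map_cons, List.sum_cons] at h1 ⊢
      have hc : c.tail.length ≤ c.length := by simp [List.length_tail]
      omega

-- 'peel' of B; c[0] is ported as headI (exact: guarded by c nonempty), c[1:] as List.tail (exact)
def pvPeel (cols : List (List Int)) : List Int :=
  if h : ((PySem.List.pyGet? cols (-1)).getD []) = [] then []
  else ((cols.filter (· ≠ [])).map (·.headI)) ++ pvPeel (cols.map List.tail)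
termination_by (cols.map List.length).sum
decreasing_by
  rcases hl : cols.getLast? with _ | l
  · simp [PySem.List.pyGet?_neg_one, hl] at h
  · have hlne : l ≠ [] := by
      simpa [PySem.List.pyGet?_neg_one, hl] using h
    have := pv_tail_sum_lt cols l hl hlne
    simpa [Function.comp_def, List.length_tail] using this

def Blocks_Interleaving_alt (splited_data : List (List (List Int))) : List Int × List Int :=
  (pvPeel (splited_data.map (fun block => (PySem.List.pyGet? block 0).getD [])),
   pvPeel (splited_data.map (fun block => (PySem.List.pyGet? block 1).getD [])))

-- ===== PRECONDITION & SPEC =====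
-- Pre_ excludes exactly the inputs where Python A raises IndexError: an empty list
-- (using_list[-1]) or a block with fewer than two entries (x[using_index] for index 1).
def Pre_Blocks_Interleaving (splited_data : List (List (List Int))) : Prop :=
  splited_data ≠ [] ∧ ∀ x ∈ splited_data, 2 ≤ x.length
instance (splited_data : List (List (List Int))) : Decidable (Pre_Blocks_Interleaving splited_data) := by
  unfold Pre_Blocks_Interleaving; infer_instance
def pvWitness_Blocks_Interleaving : List (List (List Int)) := [[[1, 2], [3]]]

def Spec_Blocks_Interleaving (splited_data : List (List (List Int))) (out : List Int × List Int) : Prop := out = Blocks_Interleaving_alt splited_data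
instance (splited_data : List (List (List Int))) (out : List Int × List Int) : Decidable (Spec_Blocks_Interleaving splited_data out) := by unfold Spec_Blocks_Interleaving; infer_instance

-- ===== CLAIM (what is proved, stated in full; the proofs are below) =====
def Claim_equal_Blocks_Interleaving : Prop := ∀ (splited_data : List (List (List Int))), Dom_Blocks_Interleaving splited_data → Pre_Blocks_Interleaving splited_data → Spec_Blocks_Interleaving splited_data (Blocks_Interleaving splited_data)

-- ===== LEMMAS AND PROOFS =====

-- the i-th column of the transposition: entry i of every codeword that is long enough
def pvColOf (cols : List (List Int)) (i : Nat) : List Int :=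
  (cols.filter (fun cw => decide (i < cw.length))).map (fun cw => cw.getD i 0)

theorem pvColOf_zero (cols : List (List Int)) :
    pvColOf cols 0 = (cols.filter (· ≠ [])).map (·.headI) := by
  induction cols with
  | nil => rfl
  | cons c cs ih =>
    cases c with
    | nil => simpa [pvColOf, List.filter_cons] using ih
    | cons a t => simpa [pvColOf, List.filter_cons] using ih

theorem pvColOf_tail (cols : List (List Int)) (i : Nat) :
    pvColOf (cols.map List.tail) i = pvColOf cols (i + 1) := by
  induction cols with
  | nil => rfl
  | cons c cs ih =>
    cases c with
    | nil => simpa [pvColOf, List.filter_cons] using ih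
    | cons a t =>
      by_cases h : i < t.length
      · have h2 : i + 1 < t.length + 1 := by omega
        simpa [pvColOf, List.filter_cons, h, h2] using ih
      · have h2 : ¬ (i + 1 < t.length + 1) := by omega
        simpa [pvColOf, List.filter_cons, h, h2] using ih

theorem pvPeel_eq_flatMap (cols : List (List Int)) :
    pvPeel cols
      = (List.range ((PySem.List.pyGet? cols (-1)).getD []).length).flatMap (pvColOf cols) := by
  induction cols using pvPeel.induct with
  | case1 cols h => rw [pvPeel, dif_pos h]; simp [h]
  | case2 cols h ih =>
    have ha : cols.attach.map (fun x : {x // x ∈ cols} => x.1.tail) = cols.map List.tail := by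
      simp
    rw [ha] at ih
    rw [pvPeel, dif_neg h]
    rcases hl : cols.getLast? with _ | l
    · exact absurd (by simp [PySem.List.pyGet?_neg_one, hl]) h
    have hL : (PySem.List.pyGet? cols (-1)).getD [] = l := by
      simp [PySem.List.pyGet?_neg_one, hl]
    rcases hlc : l with _ | ⟨a, t⟩
    · exact absurd (by rw [hL, hlc]) h
    have htl : (PySem.List.pyGet? (cols.map List.tail) (-1)).getD [] = t := by
      rw [PySem.List.pyGet?_neg_one, List.getLast?_map, hl, hlc]
      rfl
    rw [ih, htl, hL, hlc]
    simp only [List.length_cons, List.range_succ_eq_map, List.flatMap_cons, List.flatMap_map]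
    rw [pvColOf_zero]
    congr 1
    apply List.flatMap_congr
    intro i _
    exact pvColOf_tail cols i

theorem pvLoopA_flatMap (cols : List (List Int)) (n : Nat) :
    (List.range n).foldl (fun acc i =>
      cols.foldl (fun acc cw => if i < cw.length then acc ++ [cw.getD i 0] else acc) acc) []
      = (List.range n).flatMap (pvColOf cols) := by
  have h : ∀ i acc, cols.foldl
      (fun acc cw => if i < cw.length then acc ++ [cw.getD i 0] else acc) acc
      = acc ++ pvColOf cols i := by
    intro i acc
    exact PySem.List.foldl_append_ite (fun cw => i < cw.length) (fun cw => cw.getD i 0) cols acc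
  calc (List.range n).foldl (fun acc i =>
        cols.foldl (fun acc cw => if i < cw.length then acc ++ [cw.getD i 0] else acc) acc) []
      = (List.range n).foldl (fun acc i => acc ++ pvColOf cols i) [] := by
        apply PySem.List.foldl_congr_mem
        intro acc i _
        exact h i acc
    _ = (List.range n).flatMap (pvColOf cols) := by
        simpa using PySem.List.foldl_append_eq_flatMap (pvColOf cols) (List.range n) []

theorem pvLoop_eq (ul : List (List (List Int))) (idx : Int) (hne : ul ≠ []) :
    pvLoopA ul idx = pvPeel (ul.map (fun x => (PySem.List.pyGet? x idx).getD [])) := by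
  unfold pvLoopA
  simp only []
  set f : List (List Int) → List Int := fun x => (PySem.List.pyGet? x idx).getD [] with hf
  have hlast : PySem.List.pyGet? (ul.map f) (-1) = (PySem.List.pyGet? ul (-1)).map f := by
    rw [PySem.List.pyGet?_neg_one, PySem.List.pyGet?_neg_one, List.getLast?_map]
  obtain ⟨l, hl⟩ : ∃ l, ul.getLast? = some l :=
    Option.isSome_iff_exists.mp (List.getLast?_isSome.mpr hne)
  have hn : ((PySem.List.pyGet? ((PySem.List.pyGet? ul (-1)).getD []) idx).getD []).length
      = ((PySem.List.pyGet? (ul.map f) (-1)).getD []).length := by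
    rw [hlast, PySem.List.pyGet?_neg_one, hl]
    rfl
  rw [hn, pvLoopA_flatMap (ul.map f), pvPeel_eq_flatMap]

-- ===== VERDICT (by name: the statement is the Claim_ definition above) =====
theorem Blocks_Interleaving_spec : Claim_equal_Blocks_Interleaving := by
  intro sd _ hpre
  unfold Spec_Blocks_Interleaving Blocks_Interleaving Blocks_Interleaving_alt
  rw [pvLoop_eq sd 0 hpre.1, pvLoop_eq sd 1 hpre.1]
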